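-- pv_equiv track=rewrite | github.com/sarahpampalone/platform_repo | mywork/hw6.py | friend_list
-- ===== SOURCE A (Python) =====
-- def friend_list(friend_dictionary):
--     """
--     Write a method named friendList that accepts a dictionary as a parameter and reads
--     friend relationships and stores them into a new dictionary that is returned.
--     You should create a new dictionary where each key is a person's name from the original
--     simple dictionary, and the value associated with that key is a set of all friends of
--     that person. Friendships are bi-directional:
--     if Marty is friends with Danielle, Danielle is friends with Marty.
--
--     The dictionary parameter contains one friend relationship per key/value pair,
--     consisting of two names. If the dictionary parameter,friendMap looks like this:
--     Marty: Cynthia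
--     Danielle: Marty
--     Then the call of friendList(friendMap) should return a dictionary with the following
--     contents:
--     {Cynthia:[Marty], Danielle:[Marty], Marty:[Cynthia, Danielle]}
--     """
--     temp = {}
--     for person, friend in friend_dictionary.items():
--         if friend not in temp:
--             temp[friend]=[person]
--         else:
--             temp[friend].append(person)
--         if person not in temp:
--             temp[person]=[friend]
--         else:
--             temp[person].append(friend)
--     new_dict = dict(sorted(temp.items()))
--     return new_dict
-- ===== SOURCE B (Python) =====
-- def friend_list(friend_dictionary):
--     # Different decomposition: flatten to directed edges, stable-sort by source,
--     # then one grouping scan over the sorted edge list.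
--     edges = []
--     for person, friend in friend_dictionary.items():
--         edges.append((friend, person))
--         edges.append((person, friend))
--     edges.sort(key=lambda e: e[0])
--     result = {}
--     i = 0
--     n = len(edges)
--     while i < n:
--         k = edges[i][0]
--         vals = []
--         while i < n and edges[i][0] == k:
--             vals.append(edges[i][1])
--             i += 1
--         result[k] = vals
--     return result
-- ===== Notes on version B (the rewrite author's own statement) =====
-- stated objective: alternative
-- what changed: A accumulates a dict of lists with per-key membership tests and sorts the items at the end; B instead flattens the input to a list of directed edges, stable-sorts it once by source, and builds each adjacency list in a single grouping scan over consecutive equal-source runs.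
import Mathlib
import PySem

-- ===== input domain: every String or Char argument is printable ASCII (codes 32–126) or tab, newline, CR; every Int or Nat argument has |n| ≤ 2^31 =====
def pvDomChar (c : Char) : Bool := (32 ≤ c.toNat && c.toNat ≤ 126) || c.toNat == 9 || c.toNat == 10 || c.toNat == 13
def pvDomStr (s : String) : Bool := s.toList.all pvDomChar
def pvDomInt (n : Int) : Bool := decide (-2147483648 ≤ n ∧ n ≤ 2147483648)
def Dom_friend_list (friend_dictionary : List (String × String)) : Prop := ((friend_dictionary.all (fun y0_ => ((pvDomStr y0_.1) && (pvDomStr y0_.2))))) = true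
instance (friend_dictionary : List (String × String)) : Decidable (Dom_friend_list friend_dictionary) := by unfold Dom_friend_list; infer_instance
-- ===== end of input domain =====

-- B replaces A's dict-of-lists accumulation + final sort by a flat edge list that is
-- stable-sorted once by source and grouped in a single scan (alternative decomposition).

-- ===== PORT A =====
-- dict keys are distinct, so Python's tuple comparison in sorted(temp.items()) never
-- reaches the second component: sorting by the key alone is exact here.
def friend_list (friend_dictionary : List (String × String)) : List (String × List String) :=
  let temp := friend_dictionary.foldl (fun t pf =>
    let t := if t.contains pf.2 then t.modify pf.2 ([] : List String) (fun l => l ++ [pf.1])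
             else t.insert pf.2 [pf.1]
    if t.contains pf.1 then t.modify pf.1 ([] : List String) (fun l => l ++ [pf.2])
    else t.insert pf.1 [pf.2]) PySem.Dict.empty
  PySem.List.sorted temp.items (fun p => p.1) false

-- ===== PORT B =====
-- the two nested while loops of Source B: consume one run of equal-source edges per step
def flGroupB : List (String × String) → List (String × List String)
  | [] => []
  | (k, v) :: rest =>
    (k, v :: (rest.takeWhile (fun e => e.1 == k)).map (fun e => e.2)) ::
    flGroupB (rest.dropWhile (fun e => e.1 == k))
termination_by l => l.length
decreasing_by simpa using Nat.lt_succ_of_le (List.length_dropWhile_le _ _)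

def friend_list_alt (friend_dictionary : List (String × String)) : List (String × List String) :=
  let edges := friend_dictionary.foldl (fun acc pf => acc ++ [(pf.2, pf.1), (pf.1, pf.2)]) []
  flGroupB (PySem.List.sorted edges (fun e => e.1) false)

-- ===== PRECONDITION & SPEC =====
def Spec_friend_list (friend_dictionary : List (String × String)) (out : List (String × List String)) : Prop := out = friend_list_alt friend_dictionary
instance (friend_dictionary : List (String × String)) (out : List (String × List String)) : Decidable (Spec_friend_list friend_dictionary out) := by unfold Spec_friend_list; infer_instance

-- ===== CLAIM (what is proved, stated in full; the proofs are below) =====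
def Claim_equal_friend_list : Prop := ∀ (friend_dictionary : List (String × String)), Dom_friend_list friend_dictionary → Spec_friend_list friend_dictionary (friend_list friend_dictionary)

-- ===== LEMMAS AND PROOFS =====

-- the flat directed-edge list both programs process
def pvE (fd : List (String × String)) : List (String × String) :=
  fd.flatMap (fun pf => [(pf.2, pf.1), (pf.1, pf.2)])

def pvStep (d : PySem.Dict String (List String)) (e : String × String) : PySem.Dict String (List String) :=
  d.modify e.1 ([] : List String) (fun l => l ++ [e.2])

-- the canonical entry for key k built from edge list E
def pvG (E : List (String × String)) (k : String) : String × List String :=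
  (k, (E.filter (fun p => p.1 == k)).map (fun p => p.2))

lemma stepA_eq (d : PySem.Dict String (List String)) (a b : String) :
    (if d.contains a then d.modify a ([] : List String) (fun l => l ++ [b])
     else d.insert a [b]) = pvStep d (a, b) := by
  by_cases h : d.contains a = true
  · simp [h, pvStep]
  · have hf : d.contains a = false := by simpa using h
    simp [h, pvStep, PySem.Dict.modify, PySem.Dict.getD_of_not_contains d _ hf]

lemma foldA_eq (fd : List (String × String)) (d : PySem.Dict String (List String)) :
    fd.foldl (fun t pf =>
      let t := if t.contains pf.2 then t.modify pf.2 ([] : List String) (fun l => l ++ [pf.1])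
               else t.insert pf.2 [pf.1]
      if t.contains pf.1 then t.modify pf.1 ([] : List String) (fun l => l ++ [pf.2])
      else t.insert pf.1 [pf.2]) d
    = (pvE fd).foldl pvStep d := by
  induction fd generalizing d with
  | nil => rfl
  | cons pf fd ih =>
      simp only [List.foldl_cons, pvE, List.flatMap_cons] at *
      rw [ih, List.cons_append, List.singleton_append, List.foldl_cons, List.foldl_cons,
        stepA_eq, stepA_eq]

lemma items_temp (E : List (String × String)) :
    ((E.foldl pvStep PySem.Dict.empty).items)
      = (PySem.Set.ofList (E.map (fun p => p.1))).map (pvG E) := by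
  unfold pvStep
  have hnd : (E.foldl (fun d p => d.modify p.1 ([] : List String) (fun l => l ++ [p.2]))
      PySem.Dict.empty).keys.Nodup :=
    PySem.Dict.nodup_keys_foldl_modify_key E (fun p => p.1) []
      (fun _ p l => l ++ [p.2]) PySem.Dict.empty (by simp [PySem.Dict.keys_empty])
  rw [PySem.Dict.items_eq_map_keys _ hnd ([] : List String),
    PySem.Dict.keys_foldl_modify_key E (fun p => p.1) [] (fun _ p l => l ++ [p.2])]
  have hupd : PySem.Set.update (PySem.Dict.empty : PySem.Dict String (List String)).keys
      (E.map (fun p => p.1)) = PySem.Set.ofList (E.map (fun p => p.1)) := by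
    rw [PySem.Dict.keys_empty, PySem.Set.update_eq_append_filter]
    simp [PySem.Set.contains]
  rw [hupd]
  refine List.map_congr_left (fun k hk => ?_)
  simp [pvG, PySem.Dict.getD_foldl_modify_append, PySem.Dict.getD_empty]

lemma mem_items_temp (E : List (String × String)) (p : String × List String) :
    p ∈ (E.foldl pvStep PySem.Dict.empty).items ↔
      p.1 ∈ E.map (fun e => e.1) ∧ p = pvG E p.1 := by
  rw [items_temp]
  constructor
  · rintro h
    rcases List.mem_map.mp h with ⟨k, hk, rfl⟩
    exact ⟨by simpa [pvG] using (PySem.Set.mem_ofList _ _).mp hk, rfl⟩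
  · rintro ⟨h1, h2⟩
    exact List.mem_map.mpr ⟨p.1, (PySem.Set.mem_ofList _ _).mpr h1, h2.symm⟩

lemma filter_insertBy (k : String) (x : String × String) (ys : List (String × String))
    (h : ys.Pairwise (fun a b => a.1 ≤ b.1)) :
    (PySem.List.insertBy (fun a b => decide (a.1 < b.1)) x ys).filter (fun p => p.1 == k)
    = if x.1 == k then ys.filter (fun p => p.1 == k) ++ [x]
      else ys.filter (fun p => p.1 == k) := by
  induction ys with
  | nil => by_cases hx : x.1 == k <;> simp [PySem.List.insertBy, hx]
  | cons y ys ih =>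
      rcases List.pairwise_cons.mp h with ⟨hy, htl⟩
      by_cases hlt : x.1 < y.1
      · have hins : PySem.List.insertBy (fun a b => decide (a.1 < b.1)) x (y :: ys)
            = x :: y :: ys := by simp [PySem.List.insertBy, hlt]
        rw [hins]
        by_cases hx : x.1 == k
        · have hxk : x.1 = k := by simpa using hx
          have hnil : (y :: ys).filter (fun p => p.1 == k) = [] := by
            refine List.filter_eq_nil_iff.mpr (fun e he => ?_)
            have hke : k < e.1 := by
              rcases List.mem_cons.mp he with rfl | he'
              · exact hxk ▸ hlt
              · exact hxk ▸ lt_of_lt_of_le hlt (hy e he')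
            simp [Ne.symm (ne_of_lt hke)]
          simp [hx, hnil]
        · simp [List.filter_cons, hx]
      · have hins : PySem.List.insertBy (fun a b => decide (a.1 < b.1)) x (y :: ys)
            = y :: PySem.List.insertBy (fun a b => decide (a.1 < b.1)) x ys := by
          simp [PySem.List.insertBy, hlt]
        rw [hins]
        rw [List.filter_cons, List.filter_cons, ih htl]
        by_cases hx : x.1 == k <;> by_cases hyk : y.1 == k <;> simp [hx, hyk]

lemma sorted_filter (E : List (String × String)) (k : String) :
    (PySem.List.sorted E (fun e => e.1) false).filter (fun p => p.1 == k)
      = E.filter (fun p => p.1 == k) := by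
  induction E using List.reverseRecOn with
  | nil => simp [PySem.List.sorted_eq_foldl_insertBy]
  | append_singleton E x ih =>
      rw [PySem.List.sorted_eq_foldl_insertBy, List.foldl_append, List.foldl_cons,
        List.foldl_nil, ← PySem.List.sorted_eq_foldl_insertBy,
        filter_insertBy k x _ (PySem.List.sorted_pairwise E (fun e => e.1)),
        List.filter_append]
      by_cases hx : x.1 == k <;> simp [hx, ih]

lemma dropWhile_gt (k : String) (l : List (String × String))
    (h : l.Pairwise (fun a b => a.1 ≤ b.1)) (hb : ∀ e ∈ l, k ≤ e.1) :
    ∀ e ∈ l.dropWhile (fun e => e.1 == k), k < e.1 := by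
  induction l with
  | nil => simp
  | cons y l ih =>
      rcases List.pairwise_cons.mp h with ⟨hy, htl⟩
      by_cases hq : (y.1 == k) = true
      · rw [List.dropWhile_cons, if_pos hq]
        exact ih htl (fun e he => hb e (List.mem_cons_of_mem _ he))
      · rw [List.dropWhile_cons, if_neg hq]
        intro e he
        have hky : k < y.1 :=
          lt_of_le_of_ne (hb y (List.mem_cons_self)) (fun hkeq => hq (by simp [hkeq.symm]))
        rcases List.mem_cons.mp he with rfl | he'
        · exact hky
        · exact lt_of_lt_of_le hky (hy e he')

lemma flGroup_mem : ∀ (s : List (String × String)), s.Pairwise (fun a b => a.1 ≤ b.1) →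
    ∀ (p : String × List String),
      p ∈ flGroupB s ↔ p.1 ∈ s.map (fun e => e.1) ∧ p = pvG s p.1 := by
  intro s
  induction s using flGroupB.induct with
  | case1 => intro _ p; simp [flGroupB, pvG]
  | case2 k v rest ih =>
      intro h p
      obtain ⟨hk, hrest⟩ := List.pairwise_cons.mp h
      have hk' : ∀ e ∈ rest, k ≤ e.1 := fun e he => hk e he
      have hteq := List.takeWhile_append_dropWhile
        (p := fun e : String × String => e.1 == k) (l := rest)
      have ht : ∀ e ∈ rest.takeWhile (fun e => e.1 == k), e.1 = k :=
        fun e he => by simpa using List.mem_takeWhile_imp he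
      have hpd : (rest.dropWhile (fun e => e.1 == k)).Pairwise (fun a b => a.1 ≤ b.1) :=
        hrest.sublist (List.dropWhile_sublist _)
      have hd : ∀ e ∈ rest.dropWhile (fun e => e.1 == k), k < e.1 :=
        dropWhile_gt k rest hrest hk'
      have hfk : (((k, v) :: rest).filter (fun q => q.1 == k))
          = (k, v) :: rest.takeWhile (fun e => e.1 == k) := by
        conv_lhs => rw [← hteq]
        rw [List.filter_cons]
        simp only [beq_self_eq_true, if_pos, List.filter_append]
        rw [List.filter_eq_self.mpr (fun e he => by simp [ht e he]),
          List.filter_eq_nil_iff.mpr (fun e he => by simp [Ne.symm (ne_of_lt (hd e he))])]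
        simp
      have hfne : ∀ k', k' ≠ k → (((k, v) :: rest).filter (fun q => q.1 == k'))
          = (rest.dropWhile (fun e => e.1 == k)).filter (fun q => q.1 == k') := by
        intro k' hne
        conv_lhs => rw [← hteq]
        rw [List.filter_cons]
        simp only [List.filter_append]
        rw [List.filter_eq_nil_iff.mpr
          (fun e he => by simp [ht e he, Ne.symm hne])]
        simp [Ne.symm hne]
      rw [show flGroupB ((k, v) :: rest)
          = (k, v :: (rest.takeWhile (fun e => e.1 == k)).map (fun e => e.2)) ::
            flGroupB (rest.dropWhile (fun e => e.1 == k)) from by rw [flGroupB]]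
      rw [List.mem_cons]
      constructor
      · rintro (rfl | hmem)
        · refine ⟨by simp, ?_⟩
          simp only [pvG, hfk]
          simp
        · obtain ⟨hm, hp⟩ := (ih hpd p).mp hmem
          obtain ⟨e, he, hfst⟩ := List.mem_map.mp hm
          have hlt : k < p.1 := hfst ▸ hd e he
          have hne : p.1 ≠ k := Ne.symm (ne_of_lt hlt)
          refine ⟨?_, ?_⟩
          · have : e ∈ rest := (List.dropWhile_sublist _).subset he
            exact List.mem_map.mpr ⟨e, List.mem_cons_of_mem _ this, hfst⟩
          · rw [hp]
            simp only [pvG, hfne p.1 hne]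
      · rintro ⟨hm, hp⟩
        by_cases hpk : p.1 = k
        · left
          rw [hp]
          simp only [pvG, hpk, hfk]
          simp
        · right
          refine (ih hpd p).mpr ⟨?_, ?_⟩
          · rcases List.mem_map.mp hm with ⟨e, he, hfst⟩
            rcases List.mem_cons.mp he with rfl | he'
            · exact absurd hfst.symm hpk
            · rw [← hteq] at he'
              rcases List.mem_append.mp he' with h1 | h2
              · exact absurd (hfst ▸ ht e h1) hpk
              · exact List.mem_map.mpr ⟨e, h2, hfst⟩
          · rw [hp]
            simp only [pvG, hfne p.1 hpk]

lemma flGroup_pairwise : ∀ (s : List (String × String)),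
    s.Pairwise (fun a b => a.1 ≤ b.1) → (flGroupB s).Pairwise (fun a b => a.1 < b.1) := by
  intro s
  induction s using flGroupB.induct with
  | case1 => intro _; simp [flGroupB]
  | case2 k v rest ih =>
      intro h
      obtain ⟨hk, hrest⟩ := List.pairwise_cons.mp h
      have hpd : (rest.dropWhile (fun e => e.1 == k)).Pairwise (fun a b => a.1 ≤ b.1) :=
        hrest.sublist (List.dropWhile_sublist _)
      have hd : ∀ e ∈ rest.dropWhile (fun e => e.1 == k), k < e.1 :=
        dropWhile_gt k rest hrest (fun e he => hk e he)
      rw [show flGroupB ((k, v) :: rest)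
          = (k, v :: (rest.takeWhile (fun e => e.1 == k)).map (fun e => e.2)) ::
            flGroupB (rest.dropWhile (fun e => e.1 == k)) from by rw [flGroupB]]
      refine List.pairwise_cons.mpr ⟨?_, ih hpd⟩
      intro b hb
      obtain ⟨hm, _⟩ := (flGroup_mem _ hpd b).mp hb
      obtain ⟨e, he, hfst⟩ := List.mem_map.mp hm
      exact hfst ▸ hd e he

-- ===== VERDICT (by name: the statement is the Claim_ definition above) =====
theorem friend_list_spec : Claim_equal_friend_list := by
  intro fd _
  unfold Spec_friend_list
  have hA : friend_list fd
      = PySem.List.sorted ((pvE fd).foldl pvStep PySem.Dict.empty).items (fun p => p.1) false := by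
    simp only [friend_list]
    rw [foldA_eq]
  have hB : friend_list_alt fd
      = flGroupB (PySem.List.sorted (pvE fd) (fun e => e.1) false) := by
    simp only [friend_list_alt, PySem.List.foldl_append_eq_flatMap, List.nil_append, pvE]
  rw [hA, hB]
  set E := pvE fd with hE
  set s := PySem.List.sorted E (fun e => e.1) false with hs
  have hsp : s.Pairwise (fun a b => a.1 ≤ b.1) := PySem.List.sorted_pairwise E _
  have hperm : s.Perm E := PySem.List.sorted_perm E _ _
  -- B's result is a strictly key-increasing permutation of temp.items
  apply PySem.List.sorted_eq_of_perm_of_pairwise_lt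
  · -- Perm via nodup + same membership
    have hnd1 : (flGroupB s).Nodup :=
      (flGroup_pairwise s hsp).imp (fun hlt heq => by subst heq; exact absurd hlt (lt_irrefl _))
    have hnd2 : ((E.foldl pvStep PySem.Dict.empty).items).Nodup := by
      rw [items_temp]
      exact (PySem.Set.nodup_ofList _).map (fun a b hab => congrArg Prod.fst hab)
    rw [List.perm_ext_iff_of_nodup hnd1 hnd2]
    intro p
    rw [flGroup_mem s hsp p, mem_items_temp]
    have hmem : p.1 ∈ s.map (fun e => e.1) ↔ p.1 ∈ E.map (fun e => e.1) :=
      (hperm.map _).mem_iff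
    have hG : pvG s p.1 = pvG E p.1 := by
      rw [hs]
      simp [pvG, sorted_filter]
    rw [hmem, hG]
  · exact flGroup_pairwise s hsp
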